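-- pv_equiv track=rewrite | github.com/TanishSinghTak/COL100-assignments | Assignment5/ass 5.py | dates
-- ===== SOURCE A (Python) =====
-- def dates(l,d,r):
--     s = ""
--     #here i represent the days of a week with sunday as starting index 0
--     for i in range(7):
--         # if the date is 1 which we have to put in string
--         if d == 1:
--             # if start day(l) is greater than i at the moment
--             # then we will move to next i by giving space
--             if l>i:
--                 s = s + "   "
--             #else we will add 01 to string
--             else:
--                 if i == 6:
--                     s = s + "0" + str(d)
--                 else:
--                     s = s + "0" + str(d) + " "
--                 d+=1
--         # for d after date of the month end(r) we will simply add empty space in the rest string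
--         elif d > r:
--             if i == 6:
--                 s+="  "
--             else:
--                 s+="   "
--         # for other dates
--         else:
--             if i == 6:
--                 #for single integer dates we add 0 in front of them
--                 if d//10 == 0:
--                     s = s + "0" + str(d)
--                 else:
--                     s = s + str(d)
--             else:
--                 #for single integer dates we add 0 in front of them
--                 if d//10 == 0:
--                     s = s + "0" + str(d) + " "
--                 else:
--                     s = s + str(d) + " "
--             d+=1
--     return(s,d)
-- ===== SOURCE B (Python) =====
-- def fmt(x):
--     # zero-pad single-digit day numbers to two characters
--     return '0' + str(x) if 0 <= x <= 9 else str(x)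
--
-- def dates(l, d, r):
--     leading = min(l, 7) if d == 1 else 0
--     ndays = max(0, min(7 - leading, r - d + 1))
--     tokens = (['  '] * leading
--               + [fmt(x) for x in range(d, d + ndays)]
--               + ['  '] * (7 - leading - ndays))
--     return (' '.join(tokens), d + ndays)
-- ===== Notes on version B (the rewrite author's own statement) =====
-- stated objective: simpler
-- what changed: A walks the 7 cells with a per-cell branch state machine mutating (s,d); B computes the row layout arithmetically (leading blank count, day-run length via min/max, trailing blanks), builds the seven 2-char tokens as a list and joins them once; Pre_ excludes out-of-calendar inputs (a row containing day 1 whose weekday offset l is outside 0..6 or whose month end r < 1, and non-positive start dates d in -5..0 that count up into the first-of-month case) where no week-row layout is specified and the two layouts differ.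
-- outside the precondition, e.g. on dates(-1, 1, 10): A returns ('01 02 03 04 05 06 07', 8), B returns ('01 02 03 04 05 06 07 08', 9); on dates(0, 1, 0): A returns ('01                  ', 2), B returns ('                    ', 1); on dates(3, 0, 5): A returns ('00       01 02 03 04', 5), B returns ('00 01 02 03 04 05   ', 6)
import Mathlib
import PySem

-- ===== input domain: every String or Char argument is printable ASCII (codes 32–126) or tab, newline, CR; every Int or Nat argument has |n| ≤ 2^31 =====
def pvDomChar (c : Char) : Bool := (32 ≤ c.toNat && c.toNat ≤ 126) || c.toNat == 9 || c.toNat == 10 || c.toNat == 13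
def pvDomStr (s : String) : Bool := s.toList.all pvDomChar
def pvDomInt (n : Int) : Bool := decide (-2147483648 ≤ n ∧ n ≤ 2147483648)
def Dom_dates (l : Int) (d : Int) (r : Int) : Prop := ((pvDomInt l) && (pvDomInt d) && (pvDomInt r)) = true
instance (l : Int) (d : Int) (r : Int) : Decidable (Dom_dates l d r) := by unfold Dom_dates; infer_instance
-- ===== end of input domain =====

-- B replaces A's 7-iteration per-cell branch state machine by segment arithmetic: leading
-- blanks, a day run and trailing blanks are counted, the 2-char tokens listed and joined once
-- (objective: simpler; same cost).

-- ===== PORT A =====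
-- the body of A's 'for i in range(7)' loop, acting on the state (s, d)
def pvStepA (l r : Int) (acc : String × Int) (i : Int) : String × Int :=
  let s := acc.1
  let d := acc.2
  if d == 1 then
    if l > i then (s ++ "   ", d)
    else
      if i == 6 then (s ++ "0" ++ PySem.Int.toStr d, d + 1)
      else (s ++ "0" ++ PySem.Int.toStr d ++ " ", d + 1)
  else if d > r then
    if i == 6 then (s ++ "  ", d) else (s ++ "   ", d)
  else
    if i == 6 then
      if PySem.Int.floordiv d 10 == 0 then (s ++ "0" ++ PySem.Int.toStr d, d + 1)
      else (s ++ PySem.Int.toStr d, d + 1)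
    else
      if PySem.Int.floordiv d 10 == 0 then (s ++ "0" ++ PySem.Int.toStr d ++ " ", d + 1)
      else (s ++ PySem.Int.toStr d ++ " ", d + 1)

def dates (l : Int) (d : Int) (r : Int) : String × Int :=
  (PySem.List.pyRange 0 7 1).foldl (pvStepA l r) ("", d)

-- ===== PORT B =====
-- '0' + str(x) if 0 <= x <= 9 else str(x)
def pvFmtB (x : Int) : String :=
  if 0 ≤ x ∧ x ≤ 9 then "0" ++ PySem.Int.toStr x else PySem.Int.toStr x

-- Python list repetition t * n (negative n gives [])
def pvRep (t : String) (n : Int) : List String := List.replicate n.toNat t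

def dates_alt (l : Int) (d : Int) (r : Int) : String × Int :=
  let leading : Int := if d == 1 then min l 7 else 0
  let ndays : Int := max 0 (min (7 - leading) (r - d + 1))
  let tokens := pvRep "  " leading
    ++ (PySem.List.pyRange d (d + ndays) 1).map pvFmtB
    ++ pvRep "  " (7 - leading - ndays)
  (PySem.Str.join " " tokens, d + ndays)

-- ===== PRECONDITION & SPEC =====
-- Pre_ excludes out-of-calendar inputs on which the two layouts differ and neither is specified:
-- rows containing day 1 whose weekday offset l is outside 0..6 or whose month end r is < 1, and
-- non-positive start dates d in -5..0 that count up into the first-of-month case (l > 1-d, or r = 0).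
def Pre_dates (l : Int) (d : Int) (r : Int) : Prop :=
  (d = 1 → 0 ≤ l ∧ l ≤ 6 ∧ 1 ≤ r) ∧ (-5 ≤ d ∧ d ≤ 0 ∧ 0 ≤ r → l ≤ 1 - d ∧ 1 ≤ r)
instance (l : Int) (d : Int) (r : Int) : Decidable (Pre_dates l d r) := by unfold Pre_dates; infer_instance
def pvWitness_dates : Int × Int × Int := (2, 5, 30)

def Spec_dates (l : Int) (d : Int) (r : Int) (out : String × Int) : Prop := out = dates_alt l d r
instance (l : Int) (d : Int) (r : Int) (out : String × Int) : Decidable (Spec_dates l d r out) := by unfold Spec_dates; infer_instance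

-- ===== CLAIM (what is proved, stated in full; the proofs are below) =====
def Claim_equal_dates : Prop := ∀ (l : Int) (d : Int) (r : Int), Dom_dates l d r → Pre_dates l d r → Spec_dates l d r (dates l d r)

-- ===== LEMMAS AND PROOFS =====

-- "   " * n
def pvBlanks : Nat → String
  | 0 => ""
  | n + 1 => "   " ++ pvBlanks n

lemma pv_join_singleton (t : String) : PySem.Str.join " " [t] = t := by
  apply String.toList_inj.mp
  simp [PySem.Str.join, PySem.Chars.join_singleton]

lemma pv_join_cons (t u : String) (ts : List String) :
    PySem.Str.join " " (t :: u :: ts) = t ++ " " ++ PySem.Str.join " " (u :: ts) := by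
  apply String.toList_inj.mp
  simp [PySem.Str.join, PySem.Chars.join_cons_cons, String.toList_append]

lemma pv_join_append (xs ys : List String) (hx : xs ≠ []) (hy : ys ≠ []) :
    PySem.Str.join " " (xs ++ ys) = PySem.Str.join " " xs ++ " " ++ PySem.Str.join " " ys := by
  induction xs with
  | nil => exact absurd rfl hx
  | cons t xs ih =>
    cases xs with
    | nil =>
      obtain ⟨u, ts, rfl⟩ := List.exists_cons_of_ne_nil hy
      rw [List.singleton_append, pv_join_cons, pv_join_singleton]
    | cons t' xs' =>
      have h := ih (by simp)
      rw [List.cons_append] at h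
      rw [List.cons_append, List.cons_append, pv_join_cons, h, pv_join_cons t t' xs']
      simp [String.append_assoc]

lemma pv_join_rep_left (a : Nat) (rest : List String) (h : rest ≠ []) :
    PySem.Str.join " " (List.replicate a "  " ++ rest)
      = pvBlanks a ++ PySem.Str.join " " rest := by
  induction a with
  | zero =>
    apply String.toList_inj.mp
    simp [pvBlanks, String.toList_append]
  | succ a ih =>
    have hne : List.replicate a "  " ++ rest ≠ [] := by
      simp [h]
    obtain ⟨u, ts, hcons⟩ := List.exists_cons_of_ne_nil hne
    rw [List.replicate_succ, List.cons_append, hcons, pv_join_cons, ← hcons, ih]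
    apply String.toList_inj.mp
    simp [pvBlanks, String.toList_append]

lemma pv_join_rep_only (b : Nat) (h : 1 ≤ b) :
    PySem.Str.join " " (List.replicate b "  ") = pvBlanks (b - 1) ++ "  " := by
  induction b with
  | zero => omega
  | succ b ih =>
    cases Nat.eq_zero_or_pos b with
    | inl h0 =>
      subst h0
      rw [show List.replicate 1 "  " = ["  "] from rfl, pv_join_singleton]
      apply String.toList_inj.mp
      simp [pvBlanks, String.toList_append]
    | inr hb =>
      have hne : List.replicate b "  " ≠ [] := by
        simp; omega
      obtain ⟨u, ts, hcons⟩ := List.exists_cons_of_ne_nil hne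
      rw [List.replicate_succ, hcons, pv_join_cons, ← hcons, ih hb]
      apply String.toList_inj.mp
      have hb1 : b + 1 - 1 = (b - 1) + 1 := by omega
      rw [hb1]
      simp [pvBlanks, String.toList_append]

-- join " " (toks ++ "  "*t) unfolded into A's run ++ separator ++ tail-blank shape
lemma pv_join_toks_rep (toks : List String) (ht : toks ≠ []) (t : Nat) :
    PySem.Str.join " " (toks ++ List.replicate t "  ")
      = PySem.Str.join " " toks
        ++ (if t = 0 then "" else " " ++ (pvBlanks (t - 1) ++ "  ")) := by
  cases Nat.eq_zero_or_pos t with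
  | inl h0 =>
    subst h0
    simp
  | inr hpos =>
    rw [pv_join_append toks _ ht (by simp; omega), pv_join_rep_only t hpos,
      if_neg (by omega)]
    simp [String.append_assoc]

-- A's leading-blank cells (d == 1, l > i)
lemma pv_blanks_foldl (l r : Int) (n : Nat) : ∀ (i : Int) (s : String),
    (∀ p : Int, i ≤ p → p < i + n → l > p) →
    (PySem.List.pyRange i (i + n) 1).foldl (pvStepA l r) (s, 1) = (s ++ pvBlanks n, 1) := by
  induction n with
  | zero =>
    intro i s _
    rw [PySem.List.pyRange_one_eq_nil (by omega)]
    simp [pvBlanks]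
  | succ n ih =>
    intro i s h
    rw [PySem.List.pyRange_one_cons (by omega)]
    simp only [List.foldl_cons]
    have hstep : pvStepA l r (s, 1) i = (s ++ "   ", 1) := by
      have hl : l > i := h i (by omega) (by omega)
      simp [pvStepA, hl]
    rw [hstep]
    rw [show i + ((n:Nat)+1 : Nat) = (i+1) + (n:Nat) by push_cast; ring]
    rw [ih (i+1) (s ++ "   ") (by intro p h1 h2; exact h p (by omega) (by push_cast; omega))]
    simp [pvBlanks, String.append_assoc]

lemma pv_blanks_foldl'' (l r i j : Int) (s : String) (hij : i ≤ j)
    (h : ∀ p : Int, i ≤ p → p < j → l > p) :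
    (PySem.List.pyRange i j 1).foldl (pvStepA l r) (s, 1) = (s ++ pvBlanks (j - i).toNat, 1) := by
  have hb : (0:Int) ≤ j - i := by omega
  obtain ⟨n, hn⟩ := Int.eq_ofNat_of_zero_le hb
  have hx := pv_blanks_foldl l r n i s
    (by intro p h1 h2; exact h p h1 (by omega))
  rw [show i + (n:Int) = j from by omega] at hx
  rw [hx, hn, Int.toNat_natCast]

-- A's trailing-blank cells (d ≠ 1, d > r) up to the end of the row
lemma pv_tail_blanks (l r d : Int) (n : Nat) : ∀ (i : Int) (s : String),
    0 < n → i + n = 7 → d ≠ 1 → r < d →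
    (PySem.List.pyRange i 7 1).foldl (pvStepA l r) (s, d) = (s ++ pvBlanks (n - 1) ++ "  ", d) := by
  induction n with
  | zero => intro i s h; omega
  | succ n ih =>
    intro i s _ h7 hd hr
    rw [PySem.List.pyRange_one_cons (by omega)]
    simp only [List.foldl_cons]
    rcases Nat.eq_zero_or_pos n with hn | hn
    · subst hn
      have hi : i = 6 := by omega
      have hstep : pvStepA l r (s, d) i = (s ++ "  ", d) := by
        simp [pvStepA, hd, hi, hr]
      rw [hstep, PySem.List.pyRange_one_eq_nil (by omega)]
      simp [pvBlanks]
    · have hi : i < 6 := by omega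
      have hstep : pvStepA l r (s, d) i = (s ++ "   ", d) := by
        simp [pvStepA, hd, show i ≠ 6 by omega, hr]
      rw [hstep, ih (i+1) (s ++ "   ") hn (by omega) hd hr]
      have h1 : n + 1 - 1 = (n - 1) + 1 := by omega
      rw [h1]
      simp [pvBlanks, String.append_assoc]

-- A's token at a printed day cell equals B's fmt
lemma pv_fmt_eq (x : Int) :
    (if PySem.Int.floordiv x 10 == 0 then "0" ++ PySem.Int.toStr x else PySem.Int.toStr x)
      = pvFmtB x := by
  have h := PySem.Int.floordiv_eq_iff_of_pos (a := x) (b := 10) (q := 0) (by omega)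
  by_cases hfd : PySem.Int.floordiv x 10 = 0
  · have hx : 0 ≤ x ∧ x ≤ 9 := by have := h.mp hfd; omega
    rw [if_pos (by rw [beq_iff_eq]; exact hfd), pvFmtB, if_pos hx]
  · have hx : ¬ (0 ≤ x ∧ x ≤ 9) := by
      intro hx
      exact hfd (h.mpr ⟨by omega, by omega⟩)
    rw [if_neg (by rw [beq_iff_eq]; exact hfd), pvFmtB, if_neg hx]

-- one printed day cell of A (either via the d == 1 branch or the ordinary date branch)
lemma pv_cell (l r i d : Int) (s : String) (h1 : d ≤ r) (h2 : d = 1 → ¬ l > i) :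
    pvStepA l r (s, d) i = (s ++ pvFmtB d ++ (if i == 6 then "" else " "), d + 1) := by
  by_cases hd : d = 1
  · subst hd
    have hl := h2 rfl
    have hfmt : pvFmtB (1:Int) = "0" ++ PySem.Int.toStr 1 := by
      rw [pvFmtB, if_pos (by omega)]
    by_cases h6 : i = 6
    · subst h6
      simp [pvStepA, hl, hfmt, String.append_assoc]
    · simp [pvStepA, hl, h6, hfmt, String.append_assoc]
  · rw [← pv_fmt_eq d]
    have he : PySem.Int.floordiv d 10 = d / 10 := PySem.Int.floordiv_eq_ediv_of_pos (by omega)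
    by_cases hfd : d / 10 = 0 <;> by_cases h6 : i = 6 <;>
      simp [pvStepA, hd, he, hfd, h6, show ¬ d > r by omega, String.append_assoc]

-- A's run of printed day cells
lemma pv_seg_foldl (l r : Int) (n : Nat) : ∀ (i d : Int) (s : String),
    0 < n → i + n ≤ 7 →
    (∀ j : Int, 0 ≤ j → j < n → d + j ≤ r ∧ (d + j = 1 → ¬ l > i + j)) →
    (PySem.List.pyRange i (i + n) 1).foldl (pvStepA l r) (s, d) =
      (s ++ PySem.Str.join " " ((PySem.List.pyRange d (d + n) 1).map pvFmtB) ++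
        (if i + (n : Int) == 7 then "" else " "), d + n) := by
  induction n with
  | zero => intro i d s h; omega
  | succ n ih =>
    intro i d s _ h7 hcond
    obtain ⟨hdr, hd1⟩ := hcond 0 (by omega) (by omega)
    simp only [add_zero] at hdr hd1
    rw [PySem.List.pyRange_one_cons (a := i) (by omega)]
    simp only [List.foldl_cons]
    rcases Nat.eq_zero_or_pos n with hn | hn
    · -- single cell
      subst hn
      have hstep := pv_cell l r i d s hdr hd1
      rw [show i + ((0:Nat)+1 : Nat) = i + 1 by push_cast; ring,
        PySem.List.pyRange_one_eq_nil (a := i+1) (by omega)]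
      simp only [List.foldl_nil]
      rw [hstep]
      rw [show d + ((0:Nat)+1 : Nat) = d + 1 by push_cast; ring,
        show (PySem.List.pyRange d (d+1) 1) = [d] from PySem.List.pyRange_one_singleton d]
      rw [List.map_singleton, pv_join_singleton]
      have hiff : (i == 6) = ((i + 1 : Int) == 7) := by
        by_cases hi : i = 6 <;> simp [hi] <;> omega
      rw [hiff]
    · -- head cell (i < 6) then the rest
      have hi : i ≠ 6 := by omega
      have hstep := pv_cell l r i d s hdr hd1
      rw [if_neg (by simpa using hi)] at hstep
      rw [hstep]
      rw [show i + ((n+1 : Nat) : Int) = (i+1) + (n : Int) by push_cast; ring]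
      rw [ih (i+1) (d+1) (s ++ pvFmtB d ++ " ") hn (by push_cast at h7 ⊢; omega)
        (by intro j hj1 hj2
            have := hcond (j+1) (by omega) (by push_cast; omega)
            constructor
            · omega
            · intro h1
              have := this.2 (by omega)
              omega)]
      rw [show d + ((n+1 : Nat) : Int) = (d+1) + (n : Int) by push_cast; ring]
      have hjoin : PySem.Str.join " " ((PySem.List.pyRange d ((d+1) + (n:Int)) 1).map pvFmtB)
          = pvFmtB d ++ " " ++ PySem.Str.join " " ((PySem.List.pyRange (d+1) ((d+1) + (n:Int)) 1).map pvFmtB) := by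
        rw [PySem.List.pyRange_one_cons (a := d) (by omega), List.map_cons]
        rcases (PySem.List.pyRange_one_cons (a := d+1) (b := (d+1) + (n:Int)) (by omega)) with h
        rw [h, List.map_cons, pv_join_cons, ← List.map_cons, ← h]
      rw [hjoin]
      simp [String.append_assoc]

-- the day run is a nonempty token list
lemma pv_toks_ne_nil (d n : Int) (hn : 1 ≤ n) :
    (PySem.List.pyRange d (d + n) 1).map pvFmtB ≠ [] := by
  rw [PySem.List.pyRange_one_cons (by omega)]
  simp

-- run of n day cells starting at column i, then trailing blanks to the end of the row,
-- in B's joined-token shape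
lemma pv_assemble (a t : Int) (toks : List String) (ht : toks ≠ []) :
    PySem.Str.join " " (pvRep "  " a ++ toks ++ pvRep "  " t)
      = pvBlanks a.toNat ++ PySem.Str.join " " (toks ++ List.replicate t.toNat "  ") := by
  have h1 : pvRep "  " a = List.replicate a.toNat "  " := rfl
  have h2 : pvRep "  " t = List.replicate t.toNat "  " := rfl
  rw [h1, h2, List.append_assoc, pv_join_rep_left a.toNat _
    (by intro hco; exact ht (List.append_eq_nil_iff.mp hco).1)]

lemma pv_runtail (l r d i n : Int) (s : String) (hn : 1 ≤ n) (h7 : i + n ≤ 7)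
    (hc : ∀ j : Int, 0 ≤ j → j < n → d + j ≤ r ∧ (d + j = 1 → ¬ l > i + j))
    (htail : i + n < 7 → d + n ≠ 1 ∧ r < d + n) :
    (PySem.List.pyRange i 7 1).foldl (pvStepA l r) (s, d)
      = (s ++ PySem.Str.join " "
          (((PySem.List.pyRange d (d + n) 1).map pvFmtB) ++ List.replicate (7 - i - n).toNat "  "),
        d + n) := by
  obtain ⟨m, hm⟩ := Int.eq_ofNat_of_zero_le (show (0:Int) ≤ n by omega)
  subst hm
  rw [PySem.List.pyRange_one_append i (i + (m:Int)) 7 (by omega) (by omega), List.foldl_append]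
  rw [pv_seg_foldl l r m i d s (by omega) h7 hc]
  rw [pv_join_toks_rep _ (pv_toks_ne_nil d (m:Int) hn)]
  by_cases hend : i + (m:Int) = 7
  · rw [PySem.List.pyRange_one_eq_nil (by omega : (7:Int) ≤ i + (m:Int)), List.foldl_nil]
    rw [if_pos (by simpa using hend), if_pos (by omega)]
    rw [Prod.mk.injEq]
    refine ⟨?_, rfl⟩
    apply String.toList_inj.mp
    simp [String.toList_append]
  · obtain ⟨hne1, hgt⟩ := htail (by omega)
    rw [pv_tail_blanks l r (d + (m:Int)) (7 - i - (m:Int)).toNat (i + (m:Int)) _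
      (by omega) (by omega) hne1 hgt]
    rw [if_neg (by simpa using hend), if_neg (by omega)]
    rw [Prod.mk.injEq]
    refine ⟨?_, rfl⟩
    apply String.toList_inj.mp
    simp [String.toList_append]

-- evaluate B's ndays/leading under hypotheses
lemma pv_alt_eval (l d r leading ndays : Int)
    (hl : (if d == 1 then min l 7 else 0) = leading)
    (hn : max 0 (min (7 - leading) (r - d + 1)) = ndays) :
    dates_alt l d r
      = (PySem.Str.join " " (pvRep "  " leading
          ++ (PySem.List.pyRange d (d + ndays) 1).map pvFmtB
          ++ pvRep "  " (7 - leading - ndays)), d + ndays) := by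
  rw [dates_alt]
  rw [hl, hn]

-- ===== VERDICT (by name: the statement is the Claim_ definition above) =====
theorem dates_spec : Claim_equal_dates := by
  intro l d r _ hpre
  obtain ⟨hp1, hp2⟩ := hpre
  unfold Spec_dates
  by_cases hd1 : d = 1
  · -- first-of-month row: l blanks, run of min (7-l) r days, trailing blanks
    subst hd1
    obtain ⟨hl0, hl6, hr1⟩ := hp1 rfl
    set n : Int := min (7 - l) r with hn
    have hn1 : 1 ≤ n := by omega
    have hn7 : l + n ≤ 7 := by omega
    rw [pv_alt_eval l 1 r l n (by rw [if_pos (show ((1:Int) == 1) = true from rfl)]; omega) (by omega)]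
    rw [dates, PySem.List.pyRange_one_append 0 l 7 (by omega) (by omega), List.foldl_append]
    rw [pv_blanks_foldl'' l r 0 l "" (by omega) (by intro p h1 h2; omega)]
    rw [pv_runtail l r 1 l n _ hn1 hn7
      (by intro j hj1 hj2
          exact ⟨by omega, by intro h1; omega⟩)
      (by intro hlt
          exact ⟨by omega, by omega⟩)]
    rw [pv_assemble l (7 - l - n) _ (pv_toks_ne_nil 1 n hn1)]
    rw [Prod.mk.injEq]
    refine ⟨?_, rfl⟩
    rw [show l - (0:Int) = l from by ring]
    apply String.toList_inj.mp
    simp [String.toList_append]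
  · by_cases hdr : r < d
    · -- whole-blank row
      rw [dates, pv_alt_eval l d r 0 0 (by rw [if_neg (by simpa using hd1)]) (by omega)]
      rw [pv_tail_blanks l r d 7 0 "" (by omega) (by omega) hd1 hdr]
      rw [PySem.List.pyRange_one_eq_nil (by omega), List.map_nil, Prod.mk.injEq]
      exact ⟨by decide, by omega⟩
    · -- ordinary run: min 7 (r - d + 1) days then blanks
      set n : Int := min 7 (r - d + 1) with hn
      have hn1 : 1 ≤ n := by omega
      rw [pv_alt_eval l d r 0 n (by rw [if_neg (by simpa using hd1)]) (by omega)]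
      rw [dates]
      rw [pv_runtail l r d 0 n "" hn1 (by omega)
        (by intro j hj1 hj2
            refine ⟨by omega, ?_⟩
            intro h1
            -- d + j = 1 with d ≠ 1 forces -5 ≤ d ≤ 0 and r ≥ 1, so Pre_ gives l ≤ 1 - d = j
            have := hp2 ⟨by omega, by omega, by omega⟩
            omega)
        (by intro hlt
            refine ⟨?_, by omega⟩
            intro h1
            -- d + n = 1 would mean r = 0 with -5 ≤ d ≤ 0; excluded by Pre_
            have := hp2 ⟨by omega, by omega, by omega⟩
            omega)]
      rw [pv_assemble 0 (7 - 0 - n) _ (pv_toks_ne_nil d n hn1)]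
      rw [Prod.mk.injEq]
      refine ⟨?_, rfl⟩
      apply String.toList_inj.mp
      simp [String.toList_append, pvBlanks]
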